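-- pv_equiv track=rewrite | github.com/wwliu555/IRGPR_CIKM_2020 | amazon_rerank_loader.py | print_statistics
-- ===== SOURCE A (Python) =====
-- def print_statistics(train_data, test_data):
--     items = set()
--     users = set()
--     ratings = 0
--     for u, v in train_data.items():
--         users.add(u)
--         for i in v:
--             items.add(i[0])
--             ratings += 1
--     for u, v in test_data.items():
--         users.add(u)
--         for i in v:
--             items.add(i[0])
--             ratings += 1
--     return len(users), len(items), ratings
-- ===== SOURCE B (Python) =====
-- def _ndistinct(xs):
--     # count distinct values by sorting and counting boundaries of equal runs
--     n = 0
--     prev = None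
--     for x in sorted(xs):
--         if x != prev:
--             n += 1
--             prev = x
--     return n
--
--
-- def print_statistics(train_data, test_data):
--     users = _ndistinct(list(train_data) + list(test_data))
--     items = _ndistinct([i[0] for v in train_data.values() for i in v]
--                        + [i[0] for v in test_data.values() for i in v])
--     ratings = sum(len(v) for v in train_data.values()) + sum(len(v) for v in test_data.values())
--     return users, items, ratings
-- ===== Notes on version B (the rewrite author's own statement) =====
-- stated objective: alternative
-- what changed: Replaces A's hash-set accumulation inside one fused nested loop by a sort-and-scan algorithm: the user keys and the item ids are each collected into a flat list, sorted, and the distinct values counted by scanning adjacent equal runs; ratings is a separate sum of value-list lengths.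
import Mathlib
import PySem

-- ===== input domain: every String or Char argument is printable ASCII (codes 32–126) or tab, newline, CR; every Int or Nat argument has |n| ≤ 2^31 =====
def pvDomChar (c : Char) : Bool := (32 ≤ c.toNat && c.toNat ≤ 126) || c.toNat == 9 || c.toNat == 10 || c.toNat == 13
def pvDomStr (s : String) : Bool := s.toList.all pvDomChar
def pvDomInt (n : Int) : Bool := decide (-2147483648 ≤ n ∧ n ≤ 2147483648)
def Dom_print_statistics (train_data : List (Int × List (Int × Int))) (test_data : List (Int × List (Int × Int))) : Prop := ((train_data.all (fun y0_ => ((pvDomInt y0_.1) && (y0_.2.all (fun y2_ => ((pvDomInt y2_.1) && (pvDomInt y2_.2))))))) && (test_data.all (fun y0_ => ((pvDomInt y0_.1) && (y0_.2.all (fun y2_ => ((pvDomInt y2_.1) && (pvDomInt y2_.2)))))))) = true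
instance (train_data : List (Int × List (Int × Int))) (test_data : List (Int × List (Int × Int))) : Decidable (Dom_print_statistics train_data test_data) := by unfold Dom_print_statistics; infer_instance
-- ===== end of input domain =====

-- B replaces A's hash-set accumulation in one fused nested loop with a sort-and-scan
-- distinct count (sort each flat id list, count adjacent-run boundaries) plus a separate
-- length sum; objective: alternative (same result by a different algorithm).

-- ===== PORT A =====
-- state = (items, users, ratings), exactly A's three accumulators
def pvStepA (st : PySem.Set Int × PySem.Set Int × Int) (uv : Int × List (Int × Int)) :
    PySem.Set Int × PySem.Set Int × Int :=
  let users := PySem.Set.add st.2.1 uv.1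
  uv.2.foldl (fun st2 i => (PySem.Set.add st2.1 i.1, st2.2.1, st2.2.2 + 1)) (st.1, users, st.2.2)

def print_statistics (train_data : List (Int × List (Int × Int))) (test_data : List (Int × List (Int × Int))) : Int × Int × Int :=
  let st := test_data.foldl pvStepA (train_data.foldl pvStepA (PySem.Set.empty, PySem.Set.empty, 0))
  (PySem.Set.len st.2.1, PySem.Set.len st.1, st.2.2)

-- ===== PORT B =====
-- Source B's _ndistinct: sort, then scan counting positions that differ from the previous one
def pvNdistinct (xs : List Int) : Int :=
  ((PySem.List.sorted xs (fun x => x) false).foldl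
    (fun (acc : Int × Option Int) x => if acc.2 = some x then acc else (acc.1 + 1, some x))
    (0, none)).1

def print_statistics_alt (train_data : List (Int × List (Int × Int))) (test_data : List (Int × List (Int × Int))) : Int × Int × Int :=
  let users := pvNdistinct (train_data.map Prod.fst ++ test_data.map Prod.fst)
  let items := pvNdistinct (train_data.flatMap (fun p => p.2.map Prod.fst)
                              ++ test_data.flatMap (fun p => p.2.map Prod.fst))
  let ratings : Int := (train_data.map (fun p => (p.2.length : Int))).sum
                         + (test_data.map (fun p => (p.2.length : Int))).sum
  (users, items, ratings)

-- ===== PRECONDITION & SPEC =====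
def Spec_print_statistics (train_data : List (Int × List (Int × Int))) (test_data : List (Int × List (Int × Int))) (out : Int × Int × Int) : Prop := out = print_statistics_alt train_data test_data
instance (train_data : List (Int × List (Int × Int))) (test_data : List (Int × List (Int × Int))) (out : Int × Int × Int) : Decidable (Spec_print_statistics train_data test_data out) := by unfold Spec_print_statistics; infer_instance

-- ===== CLAIM =====
def Claim_equal_print_statistics : Prop := ∀ (train_data : List (Int × List (Int × Int))) (test_data : List (Int × List (Int × Int))), Dom_print_statistics train_data test_data → Spec_print_statistics train_data test_data (print_statistics train_data test_data)

-- ===== LEMMAS AND PROOFS =====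

-- A's inner loop: items gains the first components of v, ratings gains v.length, users untouched
theorem pvInnerA (v : List (Int × Int)) (it us : PySem.Set Int) (r : Int) :
    v.foldl (fun st2 i => (PySem.Set.add st2.1 i.1, st2.2.1, st2.2.2 + 1)) (it, us, r)
      = (PySem.Set.update it (v.map Prod.fst), us, r + v.length) := by
  induction v generalizing it r with
  | nil => simp [PySem.Set.update]
  | cons a t ih => simp [List.foldl, ih, PySem.Set.update]; omega

-- A's outer loop, characterised componentwise
theorem pvOuterA (l : List (Int × List (Int × Int))) (it us : PySem.Set Int) (r : Int) :
    l.foldl pvStepA (it, us, r)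
      = (PySem.Set.update it (l.flatMap (fun p => p.2.map Prod.fst)),
         PySem.Set.update us (l.map Prod.fst),
         r + (l.map (fun p => (p.2.length : Int))).sum) := by
  induction l generalizing it us r with
  | nil => simp [PySem.Set.update]
  | cons a t ih =>
      simp only [List.foldl, pvStepA, pvInnerA, ih, List.flatMap_cons, List.map_cons,
        List.sum_cons, PySem.Set.update, List.foldl_append]
      ring_nf

-- boundary count of B's scan, recursively: 1 for each element that differs from the previous
def pvCnt : Option Int → List Int → Int
  | _, [] => 0
  | p, x :: t => (if p = some x then 0 else 1) + pvCnt (some x) t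

theorem pvFold_cnt (s : List Int) (n : Int) (p : Option Int) :
    (s.foldl (fun (acc : Int × Option Int) x => if acc.2 = some x then acc else (acc.1 + 1, some x))
      (n, p)).1 = n + pvCnt p s := by
  induction s generalizing n p with
  | nil => simp [pvCnt]
  | cons x t ih =>
      by_cases h : p = some x
      · subst h; simp [List.foldl, pvCnt, ih]
      · simp only [List.foldl, pvCnt, if_neg h, ih]; ring

theorem pvCardInsert (x : Int) (S : Finset Int) : (insert x S).card = (S.erase x).card + 1 := by
  by_cases hx : x ∈ S
  · have h1 : insert x S = S := Finset.insert_eq_self.mpr hx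
    have h2 := Finset.card_erase_of_mem hx
    have h3 : 0 < S.card := Finset.card_pos.mpr ⟨x, hx⟩
    rw [h1, h2]; omega
  · rw [Finset.card_insert_of_notMem hx, Finset.erase_eq_of_notMem hx]

-- on a sorted tail all of whose elements dominate a, the scan counts the distinct values ≠ a
theorem pvCnt_some (s : List Int) (a : Int) (hp : s.Pairwise (· ≤ ·)) (ha : ∀ z ∈ s, a ≤ z) :
    pvCnt (some a) s = ((s.toFinset.erase a).card : Int) := by
  induction s generalizing a with
  | nil => simp [pvCnt]
  | cons x t ih =>
      rcases List.pairwise_cons.mp hp with ⟨hxt, hpt⟩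
      by_cases hax : a = x
      · subst hax
        simp [pvCnt, ih a hpt hxt, List.toFinset_cons, Finset.erase_insert_eq_erase]
      · have hax' : a ∉ (x :: t).toFinset := by
          simp only [List.mem_toFinset, List.mem_cons]
          rintro (h | h)
          · exact hax h
          · exact hax (le_antisymm (ha x List.mem_cons_self) (hxt a h))
        have hne : ¬ (some a = some x) := by simp [hax]
        have hax2 : a ∉ insert x t.toFinset := by rw [← List.toFinset_cons]; exact hax'
        simp only [pvCnt, if_neg hne, ih x hpt hxt, List.toFinset_cons,
          Finset.erase_eq_of_notMem hax2, pvCardInsert]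
        push_cast; ring

theorem pvCnt_none (s : List Int) (hp : s.Pairwise (· ≤ ·)) :
    pvCnt (Option.none) s = (s.toFinset.card : Int) := by
  cases s with
  | nil => simp [pvCnt]
  | cons x t =>
      rcases List.pairwise_cons.mp hp with ⟨hxt, hpt⟩
      simp only [pvCnt, pvCnt_some t x hpt hxt, List.toFinset_cons, pvCardInsert]
      push_cast; ring

theorem pvNdistinct_eq_setlen (xs : List Int) :
    pvNdistinct xs = PySem.Set.len (PySem.Set.ofList xs) := by
  have hperm := PySem.List.sorted_perm xs (fun x => x) false
  have hp := PySem.List.sorted_pairwise (xs := xs) (key := fun x => x)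
  rw [pvNdistinct, pvFold_cnt, pvCnt_none _ hp, zero_add,
    List.toFinset_eq_of_perm _ _ hperm]
  have hnd := PySem.Set.nodup_ofList (xs := xs)
  have hmem : (PySem.Set.ofList xs).toFinset = xs.toFinset := by
    ext z; simp [PySem.Set.mem_ofList]
  rw [← hmem, List.toFinset_card_of_nodup hnd]
  simp [PySem.Set.len]

-- ===== VERDICT =====
theorem print_statistics_spec : Claim_equal_print_statistics := by
  intro tr te _
  show _ = _
  simp only [print_statistics, print_statistics_alt, pvOuterA, pvNdistinct_eq_setlen,
    PySem.Set.ofList_eq_foldl, PySem.Set.update, PySem.Set.empty, List.foldl_append]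
  simp
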